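-- pv_equiv track=rewrite | github.com/dongyeoppp/Jungle_TIL | programmers/programmers_67256.py | solution
-- ===== SOURCE A (Python) =====
-- def solution(numbers, hand):
--     result = ""
--     keypad = [[1,2,3],[4,5,6],[7,8,9],["*",0,"#"]]
--     current_left = "*"
--     current_right = "#"
--
--     # 키패드에서 두개의 번호 사이의 거리 계산
--     def path(current,end):
--         for i in range(len(keypad)):
--             for j in range(len(keypad[0])):
--                 if keypad[i][j] == current:
--                     low = i
--                     col = j
--         for k in range(len(keypad)):
--             if keypad[k][1] == end:
--                 end_low = k
--                 end_col = 1
--         return abs(low-end_low) + abs(col-end_col)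
--
--     for i in numbers:
-- 		    # 번호가 1 or 4 or 7일 경우
--         if i == 1 or i == 4 or i == 7:
--             result+="L"
--             current_left = i
--         # 번호가 3 or 6 or 9일 경우
--         elif i == 3 or i == 6 or i == 9:
--             result += "R"
--             current_right = i
--         else:
-- 		        # 중간에 있는 번호 일 경우 거리 계산하여 더 거리가 짧은 손가락이 눌릴 수 있도록함
--             if path(current_left,i) < path(current_right,i):
--                 result+="L"
--                 current_left = i
--             elif path(current_left,i) > path(current_right,i):
--                 result+="R"
--                 current_right = i
--             else:
-- 		            # 거리가 같을 경우 hand값을 기준으로 정함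
--                 if hand == "left":
--                     result+="L"
--                     current_left = i
--                 else:
--                     result+="R"
--                     current_right = i
--     return result
-- ===== SOURCE B (Python) =====
-- def solution(numbers, hand):
--     # table-driven: precompute the full transition table of the finite state machine
--     # (state = last key pressed by each thumb), then the main loop is pure lookup.
--     def pos(k):
--         if k == "*":
--             return (3, 0)
--         if k == "#":
--             return (3, 2)
--         return (3, 1) if k == 0 else ((k - 1) // 3, (k - 1) % 3)
--
--     lefts = ["*", 1, 4, 7, 0, 2, 5, 8]
--     rights = ["#", 3, 6, 9, 0, 2, 5, 8]
--     table = {}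
--     for l in lefts:
--         for r in rights:
--             for d in range(10):
--                 c = d % 3
--                 if c == 1 and d != 0:
--                     table[(l, r, d)] = ("L", d, r)
--                 elif c == 0 and d != 0:
--                     table[(l, r, d)] = ("R", l, d)
--                 else:
--                     dl = abs(pos(l)[0] - pos(d)[0]) + abs(pos(l)[1] - 1)
--                     dr = abs(pos(r)[0] - pos(d)[0]) + abs(pos(r)[1] - 1)
--                     if dl < dr or (dl == dr and hand == "left"):
--                         table[(l, r, d)] = ("L", d, r)
--                     else:
--                         table[(l, r, d)] = ("R", l, d)
--     l, r = "*", "#"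
--     out = []
--     for d in numbers:
--         ch, l, r = table[(l, r, d)]
--         out.append(ch)
--     return "".join(out)
-- ===== Notes on version B (the rewrite author's own statement) =====
-- stated objective: alternative
-- what changed: B precomputes the full transition table of the finite state machine (state = the two thumbs' last keys, 8x8 states, 10 symbols) in a staged build pass, so the main loop is a pure dictionary lookup with no per-keypress distance computation or grid scan; key coordinates come from a closed-form formula instead of scanning the keypad grid.
import Mathlib
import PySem

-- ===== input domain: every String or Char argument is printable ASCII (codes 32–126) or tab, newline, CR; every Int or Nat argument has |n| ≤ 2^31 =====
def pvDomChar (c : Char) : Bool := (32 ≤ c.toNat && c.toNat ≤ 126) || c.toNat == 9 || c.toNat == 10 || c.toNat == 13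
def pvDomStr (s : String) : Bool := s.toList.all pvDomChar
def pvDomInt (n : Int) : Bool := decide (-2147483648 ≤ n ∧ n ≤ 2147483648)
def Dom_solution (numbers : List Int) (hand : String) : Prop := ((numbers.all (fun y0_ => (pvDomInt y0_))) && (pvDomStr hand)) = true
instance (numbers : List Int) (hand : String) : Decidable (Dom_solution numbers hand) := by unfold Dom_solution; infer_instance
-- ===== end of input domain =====

-- B precomputes the full transition table of the keypad finite state machine once, so the
-- main loop is a pure dictionary lookup (alternative decomposition; same asymptotic cost).

-- ===== PORT A =====
-- keypad cells are ints or the strings "*"/"#"; modelled by a small sum type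
inductive PvCell
  | star
  | hash
  | num : Int → PvCell
deriving DecidableEq, Repr

def pvKeypad : List (List PvCell) :=
  [[.num 1, .num 2, .num 3], [.num 4, .num 5, .num 6], [.num 7, .num 8, .num 9],
   [.star, .num 0, .hash]]

-- Python `path`: the two scans may leave low/col (resp. end_low) unset (UnboundLocalError);
-- modelled by Option state, none = the Python raises.
def pvPath (current : PvCell) (e : Int) : Option Int :=
  let s1 := (List.range 4).foldl (fun acc i =>
    (List.range 3).foldl (fun acc2 j =>
      if ((pvKeypad.getD i []).getD j .star) = current then some ((i : Int), (j : Int))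
      else acc2) acc) none
  let s2 := (List.range 4).foldl (fun acc k =>
      if ((pvKeypad.getD k []).getD 1 .star) = PvCell.num e then some ((k : Int), (1 : Int))
      else acc) none
  match s1, s2 with
  | some (l, c), some (el, ec) => some (|l - el| + |c - ec|)
  | _, _ => none

def pvStepA (hand : String) (st : String × PvCell × PvCell) (i : Int) :
    Option (String × PvCell × PvCell) :=
  let (result, cl, cr) := st
  if i = 1 ∨ i = 4 ∨ i = 7 then some (result ++ "L", PvCell.num i, cr)
  else if i = 3 ∨ i = 6 ∨ i = 9 then some (result ++ "R", cl, PvCell.num i)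
  else
    match pvPath cl i, pvPath cr i with
    | some dl, some dr =>
      if dl < dr then some (result ++ "L", PvCell.num i, cr)
      else if dl > dr then some (result ++ "R", cl, PvCell.num i)
      else if hand = "left" then some (result ++ "L", PvCell.num i, cr)
      else some (result ++ "R", cl, PvCell.num i)
    | _, _ => none

def solution (numbers : List Int) (hand : String) : String :=
  match numbers.foldl (fun acc i => acc.bind (fun st => pvStepA hand st i))
      (some ("", PvCell.star, PvCell.hash)) with
  | some (r, _, _) => r
  | none => ""   -- unreachable under Pre_solution (the Python raises there)

-- ===== PORT B =====
-- Source B's pos helper: closed-form coordinates of a key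
def pvPosB (k : PvCell) : Int × Int :=
  match k with
  | .star => (3, 0)
  | .hash => (3, 2)
  | .num d => if d = 0 then (3, 1) else (PySem.Int.floordiv (d - 1) 3, PySem.Int.mod (d - 1) 3)

def pvLefts : List PvCell :=
  [.star, .num 1, .num 4, .num 7, .num 0, .num 2, .num 5, .num 8]
def pvRights : List PvCell :=
  [.hash, .num 3, .num 6, .num 9, .num 0, .num 2, .num 5, .num 8]

-- the value stored at table[(l, r, d)] (the body of Source B's innermost build loop)
def pvEntry (hand : String) (l r : PvCell) (d : Int) : String × PvCell × PvCell :=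
  let c := PySem.Int.mod d 3
  if c = 1 ∧ d ≠ 0 then ("L", .num d, r)
  else if c = 0 ∧ d ≠ 0 then ("R", l, .num d)
  else
    let dl := |(pvPosB l).1 - (pvPosB (.num d)).1| + |(pvPosB l).2 - 1|
    let dr := |(pvPosB r).1 - (pvPosB (.num d)).1| + |(pvPosB r).2 - 1|
    if dl < dr ∨ (dl = dr ∧ hand = "left") then ("L", .num d, r)
    else ("R", l, .num d)

-- Source B's triple build loop over lefts × rights × range(10)
def pvTable (hand : String) : PySem.Dict (PvCell × PvCell × Int) (String × PvCell × PvCell) :=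
  pvLefts.foldl (fun t l =>
    pvRights.foldl (fun t r =>
      (PySem.List.pyRange 0 10 1).foldl (fun t d => t.insert (l, r, d) (pvEntry hand l r d)) t)
      t)
    PySem.Dict.empty

def solution_alt (numbers : List Int) (hand : String) : String :=
  let table := pvTable hand
  match numbers.foldl (fun acc d => acc.bind fun st =>
      ((table.get? (st.1, st.2.1, d)).map fun e => (e.2.1, e.2.2, st.2.2 ++ [e.1])))
      (some (PvCell.star, PvCell.hash, ([] : List String))) with
  | some st => String.join st.2.2
  | none => ""   -- unreachable under Pre_solution (the Python raises KeyError there)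

-- ===== PRECONDITION & SPEC =====
-- Pre_ excludes exactly the inputs where both Pythons raise: a number outside 0..9 makes A's
-- path helper leave end_low unbound (UnboundLocalError) and misses B's table (KeyError).
def Pre_solution (numbers : List Int) (hand : String) : Prop :=
  ∀ n ∈ numbers, n ∈ ([0, 1, 2, 3, 4, 5, 6, 7, 8, 9] : List Int)
instance (numbers : List Int) (hand : String) : Decidable (Pre_solution numbers hand) := by
  unfold Pre_solution; infer_instance

def pvWitness_solution : List Int × String := ([1, 3, 4, 5, 8, 2, 1, 4, 5, 9, 5], "right")

def Spec_solution (numbers : List Int) (hand : String) (out : String) : Prop :=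
  out = solution_alt numbers hand
instance (numbers : List Int) (hand : String) (out : String) : Decidable (Spec_solution numbers hand out) := by
  unfold Spec_solution; infer_instance

-- ===== CLAIM (what is proved, stated in full; the proofs are below) =====
def Claim_equal_solution : Prop := ∀ (numbers : List Int) (hand : String),
  Dom_solution numbers hand → Pre_solution numbers hand →
  Spec_solution numbers hand (solution numbers hand)

-- ===== LEMMAS AND PROOFS =====

lemma pv_join_append (l : List String) (s : String) :
    String.join (l ++ [s]) = String.join l ++ s := by
  simp [String.join, List.foldl_append]

lemma pv_stepA_shift (hand : String) (res : String) (cl cr : PvCell) (h : Int) :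
    pvStepA hand (res, cl, cr) h =
      Option.map (fun st => (res ++ st.1, st.2)) (pvStepA hand ("", cl, cr) h) := by
  unfold pvStepA
  dsimp only
  rcases hp : pvPath cl h with _ | dl <;> rcases hq : pvPath cr h with _ | dr <;>
    split_ifs <;> simp [hp, hq] <;> try (split_ifs <;> simp)

lemma pv_stepA_hand (hand : String) (hne : hand ≠ "left") (st : String × PvCell × PvCell) (i : Int) :
    pvStepA hand st i = pvStepA "right" st i := by
  obtain ⟨res, cl, cr⟩ := st
  unfold pvStepA
  dsimp only
  split_ifs <;> try rfl
  rcases pvPath cl i with _ | dl <;> rcases pvPath cr i with _ | dr <;>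
    simp <;> split_ifs with h1 h2 <;> simp_all

lemma pv_entry_hand (hand : String) (hne : hand ≠ "left") (l r : PvCell) (d : Int) :
    pvEntry hand l r d = pvEntry "right" l r d := by
  unfold pvEntry
  dsimp only
  split_ifs with h1 h2 h3 h4 <;> simp_all <;> linarith

-- a nested foldl is a foldl over the flattened index list
lemma pv_foldl_foldl_flatMap {α β γ : Type} (xs : List α) (g : α → List β) (f : γ → β → γ)
    (init : γ) :
    xs.foldl (fun c a => (g a).foldl f c) init = (xs.flatMap g).foldl f init := by
  induction xs generalizing init with
  | nil => rfl
  | cons a as ih => simp [List.flatMap_cons, List.foldl_append, ih]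

-- a fold of inserts of f over a key list acts like the tabulation of f on that list
lemma pv_foldl_insert_get {κ ν : Type} [BEq κ] [LawfulBEq κ] [DecidableEq κ] (f : κ → ν) (keys : List κ)
    (t : PySem.Dict κ ν) (k : κ) :
    (keys.foldl (fun t k' => t.insert k' (f k')) t).get? k =
      if k ∈ keys then some (f k) else t.get? k := by
  induction keys generalizing t with
  | nil => simp
  | cons a as ih =>
    rw [List.foldl_cons, ih]
    by_cases hmem : k ∈ as <;> by_cases hk : k = a <;>
      simp [hmem, hk, PySem.Dict.get?_insert]

def pvKeys : List (PvCell × PvCell × Int) :=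
  pvLefts.flatMap fun l => pvRights.flatMap fun r =>
    (PySem.List.pyRange 0 10 1).map fun d => (l, r, d)

lemma pv_table_eq (hand : String) :
    pvTable hand =
      pvKeys.foldl (fun t k => t.insert k (pvEntry hand k.1 k.2.1 k.2.2)) PySem.Dict.empty := by
  unfold pvTable pvKeys
  rw [← pv_foldl_foldl_flatMap]
  refine List.foldl_ext _ _ _ (fun t l _ => ?_)
  rw [← pv_foldl_foldl_flatMap]
  refine List.foldl_ext _ _ _ (fun t r _ => ?_)
  rw [List.foldl_map]

lemma pv_table_get (hand : String) (l r : PvCell) (d : Int)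
    (hl : l ∈ pvLefts) (hr : r ∈ pvRights) (hd : d ∈ ([0,1,2,3,4,5,6,7,8,9] : List Int)) :
    (pvTable hand).get? (l, r, d) = some (pvEntry hand l r d) := by
  have hrange : d ∈ PySem.List.pyRange 0 10 1 := by
    have : PySem.List.pyRange 0 10 1 = ([0,1,2,3,4,5,6,7,8,9] : List Int) := by decide
    rw [this]; exact hd
  have hkey : (l, r, d) ∈ pvKeys := by
    unfold pvKeys
    simp only [List.mem_flatMap, List.mem_map]
    exact ⟨l, hl, r, hr, d, hrange, rfl⟩
  rw [pv_table_eq]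
  simp [pv_foldl_insert_get, hkey]

-- one-step agreement of A's step with B's table entry, as one finite Bool computation
def pvStepOK (hand : String) (cl cr : PvCell) (h : Int) : Bool :=
  match pvStepA hand ("", cl, cr) h with
  | some (c, cl', cr') =>
      decide (cl' ∈ pvLefts) && decide (cr' ∈ pvRights) &&
      decide (pvEntry hand cl cr h = (c, cl', cr'))
  | none => false

lemma pv_step_all :
    ((["left", "right"] : List String).all fun hand => pvLefts.all fun cl =>
      pvRights.all fun cr => (([0,1,2,3,4,5,6,7,8,9] : List Int)).all fun h =>
        pvStepOK hand cl cr h) = true := by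
  decide

lemma pv_step_decide : ∀ hand ∈ (["left", "right"] : List String),
    ∀ cl ∈ pvLefts, ∀ cr ∈ pvRights, ∀ h ∈ ([0,1,2,3,4,5,6,7,8,9] : List Int),
    ∃ cl' ∈ pvLefts, ∃ cr' ∈ pvRights, ∃ c,
      pvStepA hand ("", cl, cr) h = some (c, cl', cr') ∧
      pvEntry hand cl cr h = (c, cl', cr') := by
  intro hand hhand cl hcl cr hcr h hh
  have hok : pvStepOK hand cl cr h = true := by
    have h1 := List.all_eq_true.mp pv_step_all hand hhand
    have h2 := List.all_eq_true.mp h1 cl hcl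
    have h3 := List.all_eq_true.mp h2 cr hcr
    exact List.all_eq_true.mp h3 h hh
  unfold pvStepOK at hok
  rcases hstep : pvStepA hand ("", cl, cr) h with _ | ⟨c, cl', cr'⟩ <;> rw [hstep] at hok
  · simp at hok
  · simp only [Bool.and_eq_true, decide_eq_true_eq] at hok
    exact ⟨cl', hok.1.1, cr', hok.1.2, c, rfl, hok.2⟩

lemma pv_loop_eq : ∀ (numbers : List Int) (hand : String) (cl cr : PvCell)
    (res : String) (out : List String),
    (∀ n ∈ numbers, n ∈ ([0,1,2,3,4,5,6,7,8,9] : List Int)) →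
    cl ∈ pvLefts → cr ∈ pvRights → res = String.join out →
    (match numbers.foldl (fun acc i => acc.bind (fun st => pvStepA hand st i))
        (some (res, cl, cr)) with
     | some (r, _, _) => r
     | none => "")
      =
    (match numbers.foldl (fun acc d => acc.bind fun st =>
          (((pvTable hand).get? (st.1, st.2.1, d)).map fun e => (e.2.1, e.2.2, st.2.2 ++ [e.1])))
        (some (cl, cr, out)) with
     | some st => String.join st.2.2
     | none => "") := by
  intro numbers
  induction numbers with
  | nil =>
    intro hand cl cr res out _ _ _ hres
    simpa using hres
  | cons h t ih =>
    intro hand cl cr res out hpre hcl hcr hres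
    have hh : h ∈ ([0,1,2,3,4,5,6,7,8,9] : List Int) := hpre h (by simp)
    -- normalise hand to "left"/"right"
    set hand0 : String := if hand = "left" then "left" else "right" with hhand0
    have hA : ∀ st i, pvStepA hand st i = pvStepA hand0 st i := by
      intro st i
      by_cases hl : hand = "left"
      · simp [hhand0, hl]
      · simp [hhand0, hl, pv_stepA_hand hand hl]
    have hE : ∀ l r d, pvEntry hand l r d = pvEntry hand0 l r d := by
      intro l r d
      by_cases hl : hand = "left"
      · simp [hhand0, hl]
      · simp [hhand0, hl, pv_entry_hand hand hl]
    have hmem : hand0 ∈ (["left", "right"] : List String) := by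
      by_cases hl : hand = "left" <;> simp [hhand0, hl]
    obtain ⟨cl', hcl', cr', hcr', c, hstepA, hentry⟩ :=
      pv_step_decide hand0 hmem cl hcl cr hcr h hh
    have hA1 : pvStepA hand (res, cl, cr) h = some (res ++ c, cl', cr') := by
      rw [hA, pv_stepA_shift, hstepA]; rfl
    have hB1 : (pvTable hand).get? (cl, cr, h) = some (c, cl', cr') := by
      rw [pv_table_get hand cl cr h hcl hcr hh, hE, hentry]
    have hres' : res ++ c = String.join (out ++ [c]) := by
      rw [pv_join_append, hres]
    have := ih hand cl' cr' (res ++ c) (out ++ [c])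
      (fun n hn => hpre n (by simp [hn])) hcl' hcr' hres'
    simpa [List.foldl_cons, hA1, hB1] using this

-- ===== VERDICT (by name: the statement is the Claim_ definition above) =====
theorem solution_spec : Claim_equal_solution := by
  intro numbers hand _ hpre
  unfold Spec_solution solution solution_alt
  have := pv_loop_eq numbers hand PvCell.star PvCell.hash "" [] hpre
    (by decide) (by decide) (by simp [String.join])
  simpa using this
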